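-- pv_equiv track=rewrite | github.com/andreiyeudakawets/IGI-STRWEB | IGI/LR3/five/count.py | count_for5
-- ===== SOURCE A (Python) =====
-- def count_for5(list):
--
--     """
--     Calculates the count of positive even numbers in the list and the sum of elements
--     after the last occurrence of zero.
--
--     Args:
--         lst (list): Input list of integers.
--
--     Returns:
--         tuple: A tuple containing the count of positive even numbers and the sum of elements
--                after the last zero (or None if no zero is found).
--     """
--     positive_even_count = 0
--     sum_after_zero = 0
--     zero_found = False
--
--     for num in list:
--         if num > 0 and num % 2 == 0:
--             positive_even_count += 1
--         elif num == 0: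
--             zero_found = True
--             sum_after_zero = 0
--         elif zero_found:
--             sum_after_zero += num
--
--     return positive_even_count, sum_after_zero
-- ===== SOURCE B (Python) =====
-- def count_for5(list):
--     count = sum(1 for n in list if n > 0 and n % 2 == 0)
--     total = 0
--     for n in reversed(list):
--         if n == 0:
--             return count, total
--         total += n
--     return count, 0
-- ===== Notes on version B (the rewrite author's own statement) =====
-- stated objective: alternative
-- what changed: B counts positive evens with one comprehension and computes the after-last-zero sum by a single right-to-left scan that stops at the first zero, instead of A's stateful left-to-right pass with a zero_found flag and resets.
-- intended difference: On lists containing a zero with at least one positive even number after the last zero, A's elif chain silently omits those positive evens from sum_after_zero (returning only the sum of the other tail elements), while B returns the sum of ALL elements after the last zero, which is what the documented 'sum of elements after the last zero' means. — e.g. on count_for5([0, 2]): A returns (1, 0), B returns (1, 2)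
import Mathlib
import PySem

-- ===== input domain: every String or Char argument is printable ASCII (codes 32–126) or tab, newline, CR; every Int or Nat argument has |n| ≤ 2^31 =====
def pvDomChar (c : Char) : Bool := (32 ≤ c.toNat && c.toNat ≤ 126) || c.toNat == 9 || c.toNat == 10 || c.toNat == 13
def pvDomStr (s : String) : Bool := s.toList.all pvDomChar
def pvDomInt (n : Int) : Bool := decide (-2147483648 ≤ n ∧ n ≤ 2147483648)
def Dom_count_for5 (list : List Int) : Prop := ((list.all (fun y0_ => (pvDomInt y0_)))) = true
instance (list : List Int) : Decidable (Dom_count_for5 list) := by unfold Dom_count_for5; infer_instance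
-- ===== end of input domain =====

-- B: one-pass count of positive evens plus a right-to-left sum to the first zero; B sums ALL
-- elements after the last zero, where A's elif chain accidentally omits positive evens (see D_).

-- ===== PORT A =====
-- A's single left-to-right loop over state (positive_even_count, sum_after_zero, zero_found)
def count_for5_step (st : Int × Int × Bool) (num : Int) : Int × Int × Bool :=
  if num > 0 ∧ PySem.Int.mod num 2 = 0 then (st.1 + 1, st.2.1, st.2.2)
  else if num = 0 then (st.1, 0, true)
  else if st.2.2 then (st.1, st.2.1 + num, st.2.2)
  else st

def count_for5 (list : List Int) : Int × Int :=
  let st := list.foldl count_for5_step (0, 0, false)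
  (st.1, st.2.1)

-- ===== PORT B =====
-- right-to-left scan of Source B: returns (total, true) at the first zero met, (total, false) at the end
def count_for5_scan (total : Int) : List Int → Int × Bool
  | [] => (total, false)
  | n :: rest => if n = 0 then (total, true) else count_for5_scan (total + n) rest

def count_for5_alt (list : List Int) : Int × Int :=
  let count := list.foldl (fun a n => if n > 0 ∧ PySem.Int.mod n 2 = 0 then a + 1 else a) 0
  let r := count_for5_scan 0 list.reverse
  (count, if r.2 then r.1 else 0)

-- ===== PRECONDITION & SPEC =====
-- On lists that contain a zero followed, after the LAST zero, by at least one positive even number,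
-- A's elif chain silently leaves those positive evens out of sum_after_zero; B sums every element
-- after the last zero, which is what the documented "sum of elements after the last zero" means.
def D_count_for5 (list : List Int) : Prop :=
  (0 : Int) ∈ list ∧
    ∃ n ∈ list.reverse.takeWhile (fun n => decide (n ≠ 0)),
      0 < n ∧ PySem.Int.mod n 2 = 0
instance (list : List Int) : Decidable (D_count_for5 list) := by unfold D_count_for5; infer_instance

def Spec_count_for5 (list : List Int) (out : Int × Int) : Prop :=
  ¬ D_count_for5 list → out = count_for5_alt list
instance (list : List Int) (out : Int × Int) : Decidable (Spec_count_for5 list out) := by unfold Spec_count_for5; infer_instance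

def pvDiffWitness_count_for5 : List Int := [0, 2]
def pvDiffWitnessOut_count_for5 : (Int × Int) × (Int × Int) := ((1, 0), (1, 2))

-- ===== CLAIM (what is proved, stated in full; the proofs are below) =====
def Claim_unchanged_count_for5 : Prop := ∀ (list : List Int), Dom_count_for5 list → Spec_count_for5 list (count_for5 list)
def Claim_changed_count_for5 : Prop := Dom_count_for5 (pvDiffWitness_count_for5) ∧ D_count_for5 (pvDiffWitness_count_for5) ∧ count_for5 (pvDiffWitness_count_for5) = pvDiffWitnessOut_count_for5.1 ∧ count_for5_alt (pvDiffWitness_count_for5) = pvDiffWitnessOut_count_for5.2 ∧ pvDiffWitnessOut_count_for5.1 ≠ pvDiffWitnessOut_count_for5.2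
def Claim_exact_count_for5 : Prop := ∀ (list : List Int), Dom_count_for5 list → D_count_for5 list → count_for5 list ≠ count_for5_alt list

-- ===== LEMMAS AND PROOFS =====

-- A-side mirror of B's scan: same right-to-left walk but skipping positive evens,
-- used only to characterise A's foldl.
def aScan (s : Int) : List Int → Int × Bool
  | [] => (s, false)
  | n :: rest =>
    if n = 0 then (s, true)
    else aScan (if n > 0 ∧ PySem.Int.mod n 2 = 0 then s else s + n) rest

theorem aScan_acc (xs : List Int) (s : Int) :
    aScan s xs = ((aScan 0 xs).1 + s, (aScan 0 xs).2) := by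
  induction xs generalizing s with
  | nil => simp [aScan]
  | cons n rest ih =>
    simp only [aScan]
    by_cases h0 : n = 0
    · rw [if_pos h0, if_pos h0]; simp
    · rw [if_neg h0, if_neg h0]
      by_cases hp : n > 0 ∧ PySem.Int.mod n 2 = 0
      · rw [if_pos hp, if_pos hp]; exact ih s
      · rw [if_neg hp, if_neg hp, ih (s + n), ih (0 + n)]
        simp only [Prod.mk.injEq]
        exact ⟨by ring, trivial⟩

theorem count_for5_main (xs : List Int) :
    xs.foldl count_for5_step (0, 0, false) =
      (xs.foldl (fun a n => if n > 0 ∧ PySem.Int.mod n 2 = 0 then a + 1 else a) 0,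
       (if (aScan 0 xs.reverse).2 then (aScan 0 xs.reverse).1 else 0),
       (aScan 0 xs.reverse).2) := by
  induction xs using List.reverseRecOn with
  | nil => simp [aScan]
  | append_singleton xs x ih =>
    rw [List.foldl_append, List.foldl_append, ih]
    simp only [List.reverse_append, List.reverse_singleton, List.singleton_append,
      List.foldl_cons, List.foldl_nil, count_for5_step, aScan]
    by_cases h0 : x = 0
    · have hp : ¬ (x > 0 ∧ PySem.Int.mod x 2 = 0) :=
        fun h => absurd h.1 (by rw [h0]; exact lt_irrefl 0)
      simp only [if_neg hp, if_pos h0]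
      simp
    · by_cases hp : x > 0 ∧ PySem.Int.mod x 2 = 0
      · simp only [if_pos hp, if_neg h0]
      · simp only [if_neg hp, if_neg h0, aScan_acc xs.reverse (0 + x)]
        rcases hf : (aScan 0 xs.reverse).2
        · simp
        · simp only [if_true, Prod.mk.injEq]
          exact ⟨trivial, by ring, trivial⟩

theorem scan_no_zero_A (xs : List Int) (s : Int) (h : (0 : Int) ∉ xs) :
    (aScan s xs).2 = false := by
  induction xs generalizing s with
  | nil => simp [aScan]
  | cons n rest ih =>
    have h0 : n ≠ 0 := fun e => h (by simp [e])
    simp only [aScan, if_neg h0]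
    exact ih _ (fun e => h (List.mem_cons_of_mem _ e))

theorem scan_no_zero_B (xs : List Int) (s : Int) (h : (0 : Int) ∉ xs) :
    (count_for5_scan s xs).2 = false := by
  induction xs generalizing s with
  | nil => simp [count_for5_scan]
  | cons n rest ih =>
    have h0 : n ≠ 0 := fun e => h (by simp [e])
    simp only [count_for5_scan, if_neg h0]
    exact ih _ (fun e => h (List.mem_cons_of_mem _ e))

theorem scan_zero_A (xs : List Int) (s : Int) (h : (0 : Int) ∈ xs) :
    (aScan s xs).2 = true := by
  induction xs generalizing s with
  | nil => simp at h
  | cons n rest ih =>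
    by_cases h0 : n = 0
    · simp [aScan, h0]
    · have : (0 : Int) ∈ rest := by
        rcases List.mem_cons.1 h with e | e
        · exact absurd e.symm h0
        · exact e
      simp only [aScan, if_neg h0]
      exact ih _ this

theorem scan_zero_B (xs : List Int) (s : Int) (h : (0 : Int) ∈ xs) :
    (count_for5_scan s xs).2 = true := by
  induction xs generalizing s with
  | nil => simp at h
  | cons n rest ih =>
    by_cases h0 : n = 0
    · simp [count_for5_scan, h0]
    · have : (0 : Int) ∈ rest := by
        rcases List.mem_cons.1 h with e | e
        · exact absurd e.symm h0
        · exact e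
      simp only [count_for5_scan, if_neg h0]
      exact ih _ this

-- B's scan total = A's scan total + sum of the positive evens before the first zero.
theorem scan_diff (xs : List Int) (s : Int) :
    (count_for5_scan s xs).1 =
      (aScan s xs).1 +
        ((xs.takeWhile (fun n => decide (n ≠ 0))).filter
            (fun n => decide (0 < n ∧ PySem.Int.mod n 2 = 0))).sum := by
  induction xs generalizing s with
  | nil => simp [count_for5_scan, aScan]
  | cons n rest ih =>
    by_cases h0 : n = 0
    · simp [count_for5_scan, aScan, h0]
    · have htw : (n :: rest).takeWhile (fun n => decide (n ≠ 0)) =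
          n :: rest.takeWhile (fun n => decide (n ≠ 0)) := by
        simp [h0]
      simp only [count_for5_scan, aScan, if_neg h0, htw]
      by_cases hp : n > 0 ∧ PySem.Int.mod n 2 = 0
      · have hf : (n :: rest.takeWhile (fun n => decide (n ≠ 0))).filter
            (fun n => decide (0 < n ∧ PySem.Int.mod n 2 = 0)) =
            n :: (rest.takeWhile (fun n => decide (n ≠ 0))).filter
              (fun n => decide (0 < n ∧ PySem.Int.mod n 2 = 0)) := by
          simp only [List.filter_cons]
          rw [if_pos (by simpa using hp)]
        rw [if_pos hp, hf, ih (s + n), aScan_acc rest (s + n), aScan_acc rest s]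
        simp only [List.sum_cons]
        ring
      · have hf : (n :: rest.takeWhile (fun n => decide (n ≠ 0))).filter
            (fun n => decide (0 < n ∧ PySem.Int.mod n 2 = 0)) =
            (rest.takeWhile (fun n => decide (n ≠ 0))).filter
              (fun n => decide (0 < n ∧ PySem.Int.mod n 2 = 0)) := by
          simp only [List.filter_cons]
          rw [if_neg (by simpa using hp)]
        rw [if_neg hp, hf]
        exact ih (s + n)

-- When no positive even survives in the prefix before the first zero, the two scans agree.
theorem scans_eq (xs : List Int) (s : Int)
    (h : ∀ n ∈ xs.takeWhile (fun n => decide (n ≠ 0)),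
        ¬ (0 < n ∧ PySem.Int.mod n 2 = 0)) :
    count_for5_scan s xs = aScan s xs := by
  induction xs generalizing s with
  | nil => rfl
  | cons n rest ih =>
    by_cases h0 : n = 0
    · simp [count_for5_scan, aScan, h0]
    · have htw : (n :: rest).takeWhile (fun n => decide (n ≠ 0)) =
          n :: rest.takeWhile (fun n => decide (n ≠ 0)) := by
        simp [h0]
      have hn : ¬ (0 < n ∧ PySem.Int.mod n 2 = 0) := h n (by rw [htw]; exact List.mem_cons_self ..)
      have hrest : ∀ m ∈ rest.takeWhile (fun n => decide (n ≠ 0)),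
          ¬ (0 < m ∧ PySem.Int.mod m 2 = 0) := by
        intro m hm; exact h m (by rw [htw]; exact List.mem_cons_of_mem _ hm)
      simp only [count_for5_scan, aScan, if_neg h0, if_neg hn]
      exact ih _ hrest

-- ===== VERDICT (by name: the statements are the Claim_ definitions above) =====
theorem count_for5_spec : Claim_unchanged_count_for5 := by
  intro list _ hD
  unfold count_for5 count_for5_alt
  rw [count_for5_main]
  by_cases hz : (0 : Int) ∈ list
  · have h : ∀ n ∈ list.reverse.takeWhile (fun n => decide (n ≠ 0)),
        ¬ (0 < n ∧ PySem.Int.mod n 2 = 0) := by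
      intro n hn hpe
      exact hD ⟨hz, ⟨n, hn, hpe⟩⟩
    rw [scans_eq list.reverse 0 h]
  · have hz' : (0 : Int) ∉ list.reverse := by simpa using hz
    rw [scan_no_zero_A _ _ hz']
    simp [scan_no_zero_B _ _ hz']

theorem count_for5_changed : Claim_changed_count_for5 := by
  unfold Claim_changed_count_for5; decide

theorem count_for5_tight : Claim_exact_count_for5 := by
  intro list _ hD
  rcases hD with ⟨hz, n, hn, hpe⟩
  have hz' : (0 : Int) ∈ list.reverse := by simpa using hz
  unfold count_for5 count_for5_alt
  rw [count_for5_main]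
  simp only [scan_zero_A _ _ hz', scan_zero_B _ _ hz', if_true]
  intro hcontra
  have h2 := congrArg Prod.snd hcontra
  simp only at h2
  rw [scan_diff] at h2
  have hmem : n ∈ (list.reverse.takeWhile (fun n => decide (n ≠ 0))).filter
      (fun n => decide (0 < n ∧ PySem.Int.mod n 2 = 0)) := by
    exact List.mem_filter.2 ⟨hn, by simpa using hpe⟩
  have hpos : 0 < ((list.reverse.takeWhile (fun n => decide (n ≠ 0))).filter
      (fun n => decide (0 < n ∧ PySem.Int.mod n 2 = 0))).sum := by
    apply List.sum_pos
    · intro m hm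
      have := (List.mem_filter.1 hm).2
      simp only [decide_eq_true_eq] at this
      exact this.1
    · exact List.ne_nil_of_mem hmem
  omega
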